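-- pv_equiv track=rewrite | github.com/jmgs7/16S-SNAPP-py3 | lineage_parser.py | get_best_tax
-- ===== SOURCE A (Python) =====
-- def get_best_tax(ref_tax, read_taxs):  # choose the better between reftax and readtax
--     """
--     Choose the better between reftax and readtax based on the resolution of taxonomic lineage.
--
--     Parameters:
--     ref_tax (str): The taxonomic lineage of the reference sequence.
--     read_taxs (list): A list of taxonomic lineages of the associated reads.
--
--     Returns:
--     str: The most resolved lineage between the reference and associated reads.
--     """
--     taxs = {}
--     for tax in read_taxs:
--         level = tax.count(";")
--         if not level in taxs:
--             taxs[level] = []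
--         taxs[level].append(tax)
--     resolution = taxs.keys()
--     # resolution.sort() #changed to next line for Python 3
--     resolution = sorted(resolution)
--     resolution.reverse()
--     top_lineage = taxs[resolution[0]][0]
--     if ref_tax.count(";") >= resolution[0]:
--         top_lineage = ref_tax
--     return top_lineage  # the most resolved lineage
-- ===== SOURCE B (Python) =====
-- def get_best_tax(ref_tax, read_taxs):
--     """Single pass: keep the highest ';'-count seen and the first lineage achieving it."""
--     best_level = -1
--     best_tax = None
--     for tax in read_taxs:
--         level = tax.count(";")
--         if best_level < level:
--             best_level, best_tax = level, tax
--     if best_tax is None: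
--         raise IndexError("list index out of range")
--     if ref_tax.count(";") >= best_level:
--         return ref_tax
--     return best_tax
-- ===== Notes on version B (the rewrite author's own statement) =====
-- stated objective: simpler
-- what changed: B replaces A's level-grouping dict plus sort-and-reverse with a single pass that keeps the highest ';'-count seen and the first lineage achieving it, raising IndexError (as A does) when read_taxs is empty.
import Mathlib
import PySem

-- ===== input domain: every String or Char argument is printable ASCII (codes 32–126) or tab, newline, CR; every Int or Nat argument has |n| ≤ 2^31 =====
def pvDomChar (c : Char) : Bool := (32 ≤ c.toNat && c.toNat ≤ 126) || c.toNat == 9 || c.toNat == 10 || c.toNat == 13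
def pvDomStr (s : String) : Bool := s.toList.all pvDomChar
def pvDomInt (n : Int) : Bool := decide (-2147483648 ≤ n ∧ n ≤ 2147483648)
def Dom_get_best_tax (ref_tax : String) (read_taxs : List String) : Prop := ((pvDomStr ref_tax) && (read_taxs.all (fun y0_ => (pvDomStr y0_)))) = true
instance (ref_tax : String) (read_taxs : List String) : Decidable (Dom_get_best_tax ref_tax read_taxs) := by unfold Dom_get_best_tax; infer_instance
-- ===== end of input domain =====

-- B replaces A's level-grouping dict + sort/reverse with a single pass keeping the best level
-- and its first achiever (simpler decomposition; same behaviour, incl. raising on empty read_taxs).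


-- ===== PORT A =====
def get_best_tax (ref_tax : String) (read_taxs : List String) : String :=
  let taxs : PySem.Dict Int (List String) := read_taxs.foldl (fun taxs tax =>
      let level : Int := (PySem.Str.count tax ";" : Int)
      let taxs := if taxs.contains level then taxs else taxs.insert level []
      taxs.modify level [] (fun g => g ++ [tax]))
    PySem.Dict.empty
  let resolution := taxs.keys
  let resolution := PySem.List.sorted resolution (fun x => x) false
  let resolution := resolution.reverse
  match PySem.List.pyGet? resolution 0 with
  | none => ""            -- IndexError on empty read_taxs; excluded by Pre_
  | some r0 =>
    match PySem.List.pyGet? (taxs.getD r0 []) 0 with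
    | none => ""          -- unreachable: the key r0 always holds a nonempty group
    | some first =>
      let top_lineage := first
      if (PySem.Str.count ref_tax ";" : Int) ≥ r0 then ref_tax else top_lineage

-- ===== PORT B =====
def get_best_tax_alt (ref_tax : String) (read_taxs : List String) : String :=
  let st : Int × Option String := read_taxs.foldl (fun st tax =>
      let level : Int := (PySem.Str.count tax ";" : Int)
      if st.1 < level then (level, some tax) else st)
    (-1, none)
  match st.2 with
  | none => ""            -- raise IndexError; excluded by Pre_
  | some best =>
    if (PySem.Str.count ref_tax ";" : Int) ≥ st.1 then ref_tax else best

-- ===== PRECONDITION & SPEC =====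
-- Pre_ excludes only the empty read list, on which both programs raise IndexError.
def Pre_get_best_tax (ref_tax : String) (read_taxs : List String) : Prop := read_taxs ≠ []
instance (ref_tax : String) (read_taxs : List String) : Decidable (Pre_get_best_tax ref_tax read_taxs) := by unfold Pre_get_best_tax; infer_instance
def pvWitness_get_best_tax : String × List String := ("a;b", ["x;y;z", "p"])

def Spec_get_best_tax (ref_tax : String) (read_taxs : List String) (out : String) : Prop := out = get_best_tax_alt ref_tax read_taxs
instance (ref_tax : String) (read_taxs : List String) (out : String) : Decidable (Spec_get_best_tax ref_tax read_taxs out) := by unfold Spec_get_best_tax; infer_instance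

-- ===== CLAIM (what is proved, stated in full; the proofs are below) =====
def Claim_equal_get_best_tax : Prop := ∀ (ref_tax : String) (read_taxs : List String), Dom_get_best_tax ref_tax read_taxs → Pre_get_best_tax ref_tax read_taxs → Spec_get_best_tax ref_tax read_taxs (get_best_tax ref_tax read_taxs)

-- ===== LEMMAS AND PROOFS =====

-- the ';'-count of a lineage, as the Int both ports compare
-- ===== LEMMAS AND PROOFS =====

-- the ';'-count of a lineage, as the Int both ports compare
def pvKey (t : String) : Int := (PySem.Str.count t ";" : Int)

theorem pvKey_nonneg (t : String) : 0 ≤ pvKey t := by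
  simp [pvKey]

-- foldr-max facts (Int)
theorem fm_le (l : List Int) (a : Int) : a ≤ l.foldr max a := by
  induction l with
  | nil => simp
  | cons x r ih => simp only [List.foldr_cons]; omega

theorem fm_mem {l : List Int} {x : Int} (a : Int) (h : x ∈ l) : x ≤ l.foldr max a := by
  induction l with
  | nil => simp at h
  | cons y r ih =>
    rcases List.mem_cons.mp h with rfl | h'
    · simp only [List.foldr_cons]; omega
    · have := ih h'; simp only [List.foldr_cons]; omega

theorem fm_ub {l : List Int} {a c : Int} (ha : a ≤ c) (h : ∀ x ∈ l, x ≤ c) :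
    l.foldr max a ≤ c := by
  induction l with
  | nil => simpa
  | cons y r ih =>
    have hy := h y (by simp)
    have := ih (fun x hx => h x (by simp [hx]))
    simp only [List.foldr_cons]; omega

theorem fm_shift {l : List Int} {a b : Int} (h : b ≤ a) :
    l.foldr max a = max a (l.foldr max b) := by
  induction l with
  | nil => simp; omega
  | cons y r ih => simp only [List.foldr_cons, ih]; omega

theorem fm_attained (l : List Int) (a : Int) : l.foldr max a = a ∨ l.foldr max a ∈ l := by
  induction l with
  | nil => simp
  | cons y r ih =>
    simp only [List.foldr_cons]
    rcases ih with h | h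
    · rw [h]; rcases le_total y a with hy | hy
      · left; exact max_eq_right hy
      · right; simp [max_eq_left hy]
    · rcases le_total y (r.foldr max a) with hy | hy
      · right; rw [max_eq_right hy]; exact List.mem_cons_of_mem _ h
      · right; simp [max_eq_left hy]

-- characterisation of B's single pass
theorem bfold (l : List String) : ∀ (m : Int) (t : Option String),
    l.foldl (fun st tax =>
        if st.1 < (PySem.Str.count tax ";" : Int)
        then ((PySem.Str.count tax ";" : Int), some tax) else st) (m, t)
      = ((l.map pvKey).foldr max m,
         if (l.map pvKey).foldr max m = m then t
         else (l.filter (fun x => pvKey x == (l.map pvKey).foldr max m)).head?) := by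
  induction l with
  | nil => intro m t; simp
  | cons x r ih =>
    intro m t
    simp only [List.foldl_cons, List.map_cons, List.foldr_cons, List.filter_cons]
    by_cases h : m < pvKey x
    · have hx : (if (m, t).1 < (PySem.Str.count x ";" : Int)
          then ((PySem.Str.count x ";" : Int), some x) else (m, t)) = (pvKey x, some x) := by
        simp [pvKey] at h ⊢; omega
      rw [hx, ih (pvKey x) (some x)]
      have hsh : (r.map pvKey).foldr max (pvKey x) = max (pvKey x) ((r.map pvKey).foldr max m) := by
        exact fm_shift (le_of_lt h)
      set K := (r.map pvKey).foldr max m with hK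
      have hmx : ¬ (max (pvKey x) K = m) := by
        have := fm_le (r.map pvKey) m; omega
      by_cases he : pvKey x = max (pvKey x) K
      · simp [hsh, ← he]
        intro hm
        exact absurd hm (by rw [he]; exact hmx)
      · have hlt : pvKey x < max (pvKey x) K := by omega
        simp only [hsh]
        rw [if_neg (by omega), if_neg hmx, if_neg (by simpa using he)]
    · have hx : (if (m, t).1 < (PySem.Str.count x ";" : Int)
          then ((PySem.Str.count x ";" : Int), some x) else (m, t)) = (m, t) := by
        simp [pvKey] at h ⊢; omega
      rw [hx, ih m t]
      have hle : pvKey x ≤ m := by omega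
      have hK : m ≤ (r.map pvKey).foldr max m := fm_le _ _
      have hmax : max (pvKey x) ((r.map pvKey).foldr max m) = (r.map pvKey).foldr max m := by omega
      rw [hmax]
      by_cases he : (r.map pvKey).foldr max m = m
      · simp [he]
      · have : ¬ (pvKey x = (r.map pvKey).foldr max m) := by omega
        rw [if_neg he, if_neg he, if_neg (by simpa using this)]

-- A's loop body is a plain dict-of-lists modify
theorem body_eq (d : PySem.Dict Int (List String)) (tax : String) :
    (if d.contains ((PySem.Str.count tax ";" : Int)) then d
     else d.insert ((PySem.Str.count tax ";" : Int)) []).modify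
        ((PySem.Str.count tax ";" : Int)) [] (fun g => g ++ [tax])
    = d.modify (pvKey tax) [] (fun g => g ++ [tax]) := by
  by_cases h : d.contains ((PySem.Str.count tax ";" : Int))
  · rw [if_pos h]; rfl
  · simp only [h, Bool.false_eq_true, if_false, pvKey]
    simp [PySem.Dict.modify, PySem.Dict.getD_insert_self, PySem.Dict.insert_insert_self,
      PySem.Dict.getD_of_not_contains (d := d) (h := by simpa using h)]

theorem dict_getD (l : List String) (c : Int) :
    (l.foldl (fun d t => d.modify (pvKey t) [] (fun g => g ++ [t])) PySem.Dict.empty).getD c []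
      = l.filter (fun t => pvKey t == c) := by
  have h := PySem.Dict.getD_foldl_modify_append (l.map (fun t => (pvKey t, t))) PySem.Dict.empty c
  rw [List.foldl_map] at h
  simpa [List.filter_map, Function.comp_def, PySem.Dict.getD_empty] using h

theorem dict_keys (l : List String) :
    (l.foldl (fun d t => d.modify (pvKey t) [] (fun g => g ++ [t])) PySem.Dict.empty).keys
      = PySem.Set.ofList (l.map pvKey) := by
  have h := PySem.Dict.keys_foldl_modify_key l pvKey [] (fun _ t => (fun g => g ++ [t]))
      PySem.Dict.empty
  simpa [PySem.Set.update_nil_left] using h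

-- ===== VERDICT (by name: the statement is the Claim_ definition above) =====
theorem get_best_tax_spec : Claim_equal_get_best_tax := by
  intro ref_tax l _ hpre
  unfold Spec_get_best_tax
  obtain ⟨x, r, rfl⟩ := List.exists_cons_of_ne_nil hpre
  set M := ((x :: r).map pvKey).foldr max (-1) with hMdef
  have hx0 : pvKey x ≤ M := fm_mem _ (by simp)
  have hM0 : 0 ≤ M := le_trans (pvKey_nonneg x) hx0
  have hMne : ¬ (M = -1) := by omega
  have hMmem : M ∈ (x :: r).map pvKey := by
    rcases fm_attained ((x :: r).map pvKey) (-1) with h | h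
    · exact absurd h hMne
    · exact h
  have hfilne : ((x :: r).filter (fun s => pvKey s == M)) ≠ [] := by
    intro hemp
    obtain ⟨t0, ht0l, ht0⟩ := List.mem_map.mp hMmem
    have := List.filter_eq_nil_iff.mp hemp t0 ht0l
    simp [ht0] at this
  obtain ⟨f0, rest, hfil⟩ := List.exists_cons_of_ne_nil hfilne
  -- B's value
  have hB : get_best_tax_alt ref_tax (x :: r) =
      (if (PySem.Str.count ref_tax ";" : Int) ≥ M then ref_tax else f0) := by
    simp only [get_best_tax_alt, bfold, ← hMdef, if_neg hMne, hfil, List.head?_cons]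
  rw [hB]
  -- A's dict, keys and groups
  simp only [get_best_tax, body_eq, dict_keys, dict_getD]
  set s := PySem.List.sorted (PySem.Set.ofList ((x :: r).map pvKey)) (fun k => k) false
    with hsdef
  have hmem_s : ∀ y, y ∈ s ↔ y ∈ (x :: r).map pvKey := by
    intro y
    rw [hsdef, PySem.List.mem_sorted, PySem.Set.mem_ofList]
  cases hrev : s.reverse with
  | nil =>
    have hs : s = [] := by simpa using congrArg List.reverse hrev
    have : M ∈ s := (hmem_s M).mpr hMmem
    rw [hs] at this
    simp at this
  | cons r0 rest2 =>
    have hr0mem : r0 ∈ (x :: r).map pvKey := by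
      have : r0 ∈ s.reverse := by rw [hrev]; exact List.mem_cons_self
      exact (hmem_s r0).mp (List.mem_reverse.mp this)
    have hub : ∀ y ∈ s, y ≤ r0 := by
      have hp : s.Pairwise (fun a b => a ≤ b) :=
        PySem.List.sorted_pairwise (PySem.Set.ofList ((x :: r).map pvKey)) (fun k => k)
      have hpr : s.reverse.Pairwise (fun a b => b ≤ a) := List.pairwise_reverse.mpr hp
      rw [hrev] at hpr
      intro y hy
      have hy' : y ∈ r0 :: rest2 := by rw [← hrev]; exact List.mem_reverse.mpr hy
      rcases List.mem_cons.mp hy' with rfl | hy''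
      · exact le_refl _
      · exact (List.pairwise_cons.mp hpr).1 y hy''
    have hr00 : 0 ≤ r0 := by
      obtain ⟨u, _, hu⟩ := List.mem_map.mp hr0mem
      rw [← hu]; exact pvKey_nonneg u
    have hr0 : r0 = M := by
      refine le_antisymm (fm_mem (-1) hr0mem) (fm_ub (by omega) ?_)
      intro y hy
      exact hub y ((hmem_s y).mpr hy)
    rw [hr0]
    simp only [PySem.List.pyGet?_zero_cons, hfil]
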